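-- pv_equiv track=rewrite | github.com/LegenDong/IQIYI_VID_FACE_2019 | utils.py | default_scene_feat_remove_noise
-- ===== SOURCE A (Python) =====
-- def default_scene_feat_remove_noise(frame_infos, labels, video_names, **kwargs):
--     assert len(frame_infos) == len(labels)
--     assert len(labels) == len(video_names)
--     idx_list = []
--     for label_idx, label in enumerate(labels):
--         if 'TRAIN' in video_names[label_idx] or (label != 0 and 'VAL' in video_names[label_idx]):
--             idx_list.append(label_idx)
--
--     frame_infos = [frame_infos[idx] for idx in idx_list]
--     labels = [labels[idx] for idx in idx_list]
--     video_names = [video_names[idx] for idx in idx_list]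
--
--     return frame_infos, labels, video_names
-- ===== SOURCE B (Python) =====
-- def default_scene_feat_remove_noise(frame_infos, labels, video_names, **kwargs):
--     assert len(frame_infos) == len(labels)
--     assert len(labels) == len(video_names)
--     out_infos = list(frame_infos)
--     out_labels = list(labels)
--     out_names = list(video_names)
--     for i in reversed(range(len(labels))):
--         vn = video_names[i]
--         if not ('TRAIN' in vn or (labels[i] != 0 and 'VAL' in vn)):
--             del out_infos[i]
--             del out_labels[i]
--             del out_names[i]
--     return out_infos, out_labels, out_names
-- ===== Notes on version B (the rewrite author's own statement) =====
-- stated objective: alternative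
-- what changed: Instead of collecting the kept entries (A's index list plus three indexed comprehensions), B copies the three lists and literally removes the noise: it walks the indices in reverse and deletes each noisy position in place (del) from all three copies.
import Mathlib
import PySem

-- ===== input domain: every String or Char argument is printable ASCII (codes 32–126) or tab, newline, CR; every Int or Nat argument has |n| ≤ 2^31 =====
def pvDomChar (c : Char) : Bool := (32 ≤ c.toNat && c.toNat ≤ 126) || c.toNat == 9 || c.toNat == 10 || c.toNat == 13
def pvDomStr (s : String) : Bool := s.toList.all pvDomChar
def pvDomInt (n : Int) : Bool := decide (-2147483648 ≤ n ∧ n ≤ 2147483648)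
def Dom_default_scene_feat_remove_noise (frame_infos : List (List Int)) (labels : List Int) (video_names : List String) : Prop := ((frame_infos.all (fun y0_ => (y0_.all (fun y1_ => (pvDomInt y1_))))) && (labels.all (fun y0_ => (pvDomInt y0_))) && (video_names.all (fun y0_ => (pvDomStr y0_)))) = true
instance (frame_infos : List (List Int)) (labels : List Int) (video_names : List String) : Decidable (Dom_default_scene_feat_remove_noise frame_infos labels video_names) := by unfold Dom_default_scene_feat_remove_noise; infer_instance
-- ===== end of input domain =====

-- B literally "removes noise": it copies the three lists and deletes the noisy positions in
-- place, walking the indices in reverse, instead of A's index-list + three comprehensions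
-- (objective: alternative; same return value, B does not mutate its arguments).

-- ===== PORT A =====
-- the loop 'for label_idx, label in enumerate(labels): if … : idx_list.append(label_idx)'
-- (video_names[label_idx] is in range on every input admitted by Pre_, so pyGetD's default is never used there)
def pvIdxList (vn : List String) (i : Nat) : List Int → List Nat
  | [] => []
  | l :: ls =>
    if PySem.Str.isIn "TRAIN" (PySem.List.pyGetD vn (i : Int) "")
       || (decide (l ≠ 0) && PySem.Str.isIn "VAL" (PySem.List.pyGetD vn (i : Int) "")) then
      i :: pvIdxList vn (i + 1) ls
    else
      pvIdxList vn (i + 1) ls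

def default_scene_feat_remove_noise (frame_infos : List (List Int)) (labels : List Int) (video_names : List String) : List (List Int) × List Int × List String :=
  -- the asserts raise AssertionError on length mismatch: those inputs are excluded by Pre_
  let idx_list := pvIdxList video_names 0 labels
  (idx_list.map (fun idx : Nat => PySem.List.pyGetD frame_infos (idx : Int) []),
   idx_list.map (fun idx : Nat => PySem.List.pyGetD labels (idx : Int) 0),
   idx_list.map (fun idx : Nat => PySem.List.pyGetD video_names (idx : Int) ""))

-- ===== PORT B =====
-- loop body of 'for i in reversed(range(len(labels)))'; 'del xs[i]' on an in-range
-- nonnegative i is exactly List.eraseIdx i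
def pvStep (labels : List Int) (video_names : List String)
    (acc : List (List Int) × List Int × List String) (i : Nat) :
    List (List Int) × List Int × List String :=
  let vn := PySem.List.pyGetD video_names (i : Int) ""
  if !(PySem.Str.isIn "TRAIN" vn
       || (decide (PySem.List.pyGetD labels (i : Int) 0 ≠ 0) && PySem.Str.isIn "VAL" vn)) then
    (acc.1.eraseIdx i, acc.2.1.eraseIdx i, acc.2.2.eraseIdx i)
  else acc

def default_scene_feat_remove_noise_alt (frame_infos : List (List Int)) (labels : List Int) (video_names : List String) : List (List Int) × List Int × List String :=
  -- the asserts raise AssertionError on length mismatch: those inputs are excluded by Pre_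
  (List.range labels.length).reverse.foldl (pvStep labels video_names)
    (frame_infos, labels, video_names)

-- ===== PRECONDITION & SPEC =====
-- Pre_: the two asserts in A (and in B) raise AssertionError unless the three lists have equal length.
def Pre_default_scene_feat_remove_noise (frame_infos : List (List Int)) (labels : List Int) (video_names : List String) : Prop :=
  frame_infos.length = labels.length ∧ labels.length = video_names.length
instance (frame_infos : List (List Int)) (labels : List Int) (video_names : List String) : Decidable (Pre_default_scene_feat_remove_noise frame_infos labels video_names) := by unfold Pre_default_scene_feat_remove_noise; infer_instance

def pvWitness_default_scene_feat_remove_noise : List (List Int) × List Int × List String :=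
  ([[1, 2], [3], [4]], [0, 1, 2], ["TRAIN_x", "VAL_y", "TEST_z"])

def Spec_default_scene_feat_remove_noise (frame_infos : List (List Int)) (labels : List Int) (video_names : List String) (out : List (List Int) × List Int × List String) : Prop := out = default_scene_feat_remove_noise_alt frame_infos labels video_names
instance (frame_infos : List (List Int)) (labels : List Int) (video_names : List String) (out : List (List Int) × List Int × List String) : Decidable (Spec_default_scene_feat_remove_noise frame_infos labels video_names out) := by unfold Spec_default_scene_feat_remove_noise; infer_instance

-- ===== CLAIM (what is proved, stated in full; the proofs are below) =====
def Claim_equal_default_scene_feat_remove_noise : Prop := ∀ (frame_infos : List (List Int)) (labels : List Int) (video_names : List String), Dom_default_scene_feat_remove_noise frame_infos labels video_names → Pre_default_scene_feat_remove_noise frame_infos labels video_names → Spec_default_scene_feat_remove_noise frame_infos labels video_names (default_scene_feat_remove_noise frame_infos labels video_names)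

-- ===== LEMMAS AND PROOFS =====

-- the common reference value: the right-fold filter of the zipped triples (proof helper only)
def pvRec : List (List Int × Int × String) → List (List Int) × List Int × List String
  | [] => ([], [], [])
  | t :: ts =>
    let r := pvRec ts
    if PySem.Str.isIn "TRAIN" t.2.2
       || (decide (t.2.1 ≠ 0) && PySem.Str.isIn "VAL" t.2.2) then
      (t.1 :: r.1, t.2.1 :: r.2.1, t.2.2 :: r.2.2)
    else r

lemma pvGetD_append_len {α : Type} (pre : List α) (x : α) (suf : List α) (d : α) :
    PySem.List.pyGetD (pre ++ x :: suf) ((pre.length : Nat) : Int) d = x := by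
  simp [PySem.List.pyGetD_natCast, List.getD]

-- A's port equals pvRec of the zipped input
lemma pvKey : ∀ (ls : List Int) (fs : List (List Int)) (vs : List String)
    (P1 : List (List Int)) (P2 : List Int) (P3 : List String),
    fs.length = ls.length → vs.length = ls.length →
    P2.length = P1.length → P3.length = P1.length →
    (((pvIdxList (P3 ++ vs) P1.length ls).map (fun idx : Nat => PySem.List.pyGetD (P1 ++ fs) (idx : Int) []),
      (pvIdxList (P3 ++ vs) P1.length ls).map (fun idx : Nat => PySem.List.pyGetD (P2 ++ ls) (idx : Int) 0),
      (pvIdxList (P3 ++ vs) P1.length ls).map (fun idx : Nat => PySem.List.pyGetD (P3 ++ vs) (idx : Int) ""))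
      : List (List Int) × List Int × List String)
    = pvRec (List.zip fs (List.zip ls vs)) := by
  intro ls
  induction ls with
  | nil =>
    intro fs vs P1 P2 P3 hf hv h2 h3
    have : fs = [] := List.length_eq_zero_iff.mp hf
    subst this
    simp [pvIdxList, pvRec]
  | cons l ls' ih =>
    intro fs vs P1 P2 P3 hf hv h2 h3
    match fs, vs with
    | F :: fs', v :: vs' =>
      have hv' : PySem.List.pyGetD (P3 ++ v :: vs') ((P1.length : Nat) : Int) "" = v := by
        rw [← h3]; exact pvGetD_append_len P3 v vs' ""
      have ihx := ih fs' vs' (P1 ++ [F]) (P2 ++ [l]) (P3 ++ [v])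
        (by simpa using Nat.succ_injective hf) (by simpa using Nat.succ_injective hv)
        (by simp [h2]) (by simp [h3])
      simp only [List.append_assoc, List.singleton_append, List.length_append,
        List.length_cons, List.length_nil, Nat.zero_add] at ihx
      simp only [pvIdxList, hv', List.zip_cons_cons, pvRec]
      by_cases h : (PySem.Str.isIn "TRAIN" v || (decide (l ≠ 0) && PySem.Str.isIn "VAL" v)) = true
      · rw [if_pos h, if_pos h]
        simp only [List.map_cons]
        have i1 := congrArg (·.1) ihx
        have i2 := congrArg (·.2.1) ihx
        have i3 := congrArg (·.2.2) ihx
        simp only at i1 i2 i3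
        have g1 : PySem.List.pyGetD (P1 ++ F :: fs') ((P1.length : Nat) : Int) [] = F :=
          pvGetD_append_len P1 F fs' []
        have g2 : PySem.List.pyGetD (P2 ++ l :: ls') ((P1.length : Nat) : Int) 0 = l := by
          rw [← h2]; exact pvGetD_append_len P2 l ls' 0
        simp only [Prod.mk.injEq, g1, g2, hv']
        exact ⟨by rw [i1], by rw [i2], by rw [i3]⟩
      · rw [if_neg h, if_neg h]
        exact ihx

lemma pvEraseTake {α : Type} (xs : List α) (i : Nat) (h : i < xs.length) :
    (xs.take (i + 1)).eraseIdx i = xs.take i := by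
  have hlen : (List.take i xs).length = i := by simp [Nat.min_eq_left h.le]
  rw [List.take_add_one, List.getElem?_eq_getElem h,
      show (some xs[i]).toList = [xs[i]] from rfl,
      List.eraseIdx_append_of_length_le (le_of_eq hlen), hlen]
  simp

lemma pvEraseTakeApp {α : Type} (xs : List α) (K : List α) (i : Nat) (h : i < xs.length) :
    (xs.take (i + 1) ++ K).eraseIdx i = xs.take i ++ K := by
  have hlen : i < (xs.take (i + 1)).length := by simp; omega
  rw [List.eraseIdx_append_of_lt_length hlen, pvEraseTake xs i h]

lemma pvTakeSucc {α : Type} (xs : List α) (i : Nat) (h : i < xs.length) :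
    xs.take (i + 1) = xs.take i ++ [xs[i]] := by
  rw [List.take_add_one, List.getElem?_eq_getElem h]; rfl

-- B's reverse-deletion loop equals pvRec of the zipped input
lemma pvDelLoop (fs : List (List Int)) (ls : List Int) (vs : List String)
    (hf : fs.length = ls.length) (hv : vs.length = ls.length) :
    ∀ i, i ≤ ls.length →
    (List.range i).reverse.foldl (pvStep ls vs)
      (fs.take i ++ (pvRec (List.zip (fs.drop i) (List.zip (ls.drop i) (vs.drop i)))).1,
       ls.take i ++ (pvRec (List.zip (fs.drop i) (List.zip (ls.drop i) (vs.drop i)))).2.1,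
       vs.take i ++ (pvRec (List.zip (fs.drop i) (List.zip (ls.drop i) (vs.drop i)))).2.2)
    = pvRec (List.zip fs (List.zip ls vs)) := by
  intro i
  induction i with
  | zero => intro _; simp
  | succ i ih =>
    intro hle
    have hi : i < ls.length := by omega
    have hif : i < fs.length := by omega
    have hiv : i < vs.length := by omega
    have hrg : (List.range (i + 1)).reverse = i :: (List.range i).reverse := by
      simp [List.range_succ]
    rw [hrg, List.foldl_cons]
    have hdropf : fs.drop i = fs[i] :: fs.drop (i + 1) := List.drop_eq_getElem_cons hif
    have hdropl : ls.drop i = ls[i] :: ls.drop (i + 1) := List.drop_eq_getElem_cons hi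
    have hdropv : vs.drop i = vs[i] :: vs.drop (i + 1) := List.drop_eq_getElem_cons hiv
    have hgv : PySem.List.pyGetD vs (i : Int) "" = vs[i] := by
      simp [PySem.List.pyGetD_natCast, List.getD_eq_getElem?_getD, List.getElem?_eq_getElem hiv]
    have hgl : PySem.List.pyGetD ls (i : Int) 0 = ls[i] := by
      simp [PySem.List.pyGetD_natCast, List.getD_eq_getElem?_getD, List.getElem?_eq_getElem hi]
    have hstep : pvStep ls vs
        (fs.take (i+1) ++ (pvRec (List.zip (fs.drop (i+1)) (List.zip (ls.drop (i+1)) (vs.drop (i+1))))).1,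
         ls.take (i+1) ++ (pvRec (List.zip (fs.drop (i+1)) (List.zip (ls.drop (i+1)) (vs.drop (i+1))))).2.1,
         vs.take (i+1) ++ (pvRec (List.zip (fs.drop (i+1)) (List.zip (ls.drop (i+1)) (vs.drop (i+1))))).2.2) i
      = (fs.take i ++ (pvRec (List.zip (fs.drop i) (List.zip (ls.drop i) (vs.drop i)))).1,
         ls.take i ++ (pvRec (List.zip (fs.drop i) (List.zip (ls.drop i) (vs.drop i)))).2.1,
         vs.take i ++ (pvRec (List.zip (fs.drop i) (List.zip (ls.drop i) (vs.drop i)))).2.2) := by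
      have hrec : pvRec (List.zip (fs.drop i) (List.zip (ls.drop i) (vs.drop i)))
          = (let r := pvRec (List.zip (fs.drop (i+1)) (List.zip (ls.drop (i+1)) (vs.drop (i+1))));
             if PySem.Str.isIn "TRAIN" vs[i]
                || (decide (ls[i] ≠ 0) && PySem.Str.isIn "VAL" vs[i]) then
               (fs[i] :: r.1, ls[i] :: r.2.1, vs[i] :: r.2.2)
             else r) := by
        rw [hdropf, hdropl, hdropv, List.zip_cons_cons, List.zip_cons_cons]
        rfl
      unfold pvStep
      rw [hgv, hgl, hrec]
      set K := pvRec (List.zip (fs.drop (i+1)) (List.zip (ls.drop (i+1)) (vs.drop (i+1)))) with hK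
      have e1 : (fs.take (i+1) ++ K.1).eraseIdx i = fs.take i ++ K.1 := pvEraseTakeApp fs K.1 i hif
      have e2 : (ls.take (i+1) ++ K.2.1).eraseIdx i = ls.take i ++ K.2.1 := pvEraseTakeApp ls K.2.1 i hi
      have e3 : (vs.take (i+1) ++ K.2.2).eraseIdx i = vs.take i ++ K.2.2 := pvEraseTakeApp vs K.2.2 i hiv
      by_cases h : (PySem.Str.isIn "TRAIN" vs[i]
          || (decide (ls[i] ≠ 0) && PySem.Str.isIn "VAL" vs[i])) = true
      · simp only [h, Bool.not_true, Bool.false_eq_true, if_false, if_pos, Prod.mk.injEq]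
        exact ⟨by rw [pvTakeSucc fs i hif, List.append_assoc]; rfl,
               by rw [pvTakeSucc ls i hi, List.append_assoc]; rfl,
               by rw [pvTakeSucc vs i hiv, List.append_assoc]; rfl⟩
      · simp only [Bool.not_eq_true] at h
        simp only [h, Bool.not_false, if_true, Bool.false_eq_true, if_false]
        exact congrArg₂ _ e1 (congrArg₂ _ e2 e3)
    rw [hstep, ih (by omega)]

-- ===== VERDICT (by name: the statement is the Claim_ definition above) =====
theorem default_scene_feat_remove_noise_spec : Claim_equal_default_scene_feat_remove_noise := by
  intro fi lb vn _dom hpre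
  obtain ⟨h1, h2⟩ := hpre
  unfold Spec_default_scene_feat_remove_noise default_scene_feat_remove_noise default_scene_feat_remove_noise_alt
  have hB := pvDelLoop fi lb vn h1 h2.symm lb.length (le_refl _)
  simp only [List.take_length, List.take_of_length_le (le_of_eq h1),
    List.take_of_length_le (le_of_eq h2.symm), List.drop_length,
    List.drop_of_length_le (le_of_eq h1), List.drop_of_length_le (le_of_eq h2.symm)] at hB
  have hA := pvKey lb fi vn [] [] [] h1 (by omega) rfl rfl
  simp only [List.nil_append, List.length_nil] at hA
  rw [hA, ← hB]
  simp [pvRec]
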